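-- pv_equiv track=rewrite | github.com/kresimir-lukin/AdventOfCode2019 | day15.py | part2
-- ===== SOURCE A (Python) =====
-- def part2(points):
--     Ox, Oy = next((x, y) for (x, y), val in points.items() if val == 'O')
--     queue = [(Ox, Oy)]
--     seen = set()
--     minutes = -1
--     while queue:
--         queue_next_minute = []
--         while queue:
--             x, y = queue.pop()
--             seen.add((x, y))
--             for dx, dy in [(0, -1), (0, 1), (-1, 0), (1, 0)]:
--                 xx, yy = x + dx, y + dy
--                 if (xx, yy) not in seen and points.get((xx, yy), '#') == '.':
--                     queue_next_minute.append((xx, yy))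
--         queue = queue_next_minute
--         minutes += 1
--     return minutes
-- ===== SOURCE B (Python) =====
-- def part2(points):
--     Ox, Oy = next((x, y) for (x, y), val in points.items() if val == 'O')
--     dist = {(Ox, Oy): 0}
--     queue = [(Ox, Oy)]
--     i = 0
--     while i < len(queue):
--         x, y = queue[i]
--         i += 1
--         d = dist[(x, y)]
--         for dx, dy in [(0, -1), (0, 1), (-1, 0), (1, 0)]:
--             nbr = (x + dx, y + dy)
--             if nbr not in dist and points.get(nbr, '#') == '.':
--                 dist[nbr] = d + 1
--                 queue.append(nbr)
--     return max(dist.values())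
-- ===== Notes on version B (the rewrite author's own statement) =====
-- stated objective: faster
-- what changed: A runs a wave-by-wave flood fill with two frontier lists and an explicit minute counter, where duplicate frontier entries can pile up and be re-processed; B runs a single flat BFS queue indexed by a cursor, recording each cell's distance once in a dist map at discovery time, and returns max(dist.values()).
import Mathlib
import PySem

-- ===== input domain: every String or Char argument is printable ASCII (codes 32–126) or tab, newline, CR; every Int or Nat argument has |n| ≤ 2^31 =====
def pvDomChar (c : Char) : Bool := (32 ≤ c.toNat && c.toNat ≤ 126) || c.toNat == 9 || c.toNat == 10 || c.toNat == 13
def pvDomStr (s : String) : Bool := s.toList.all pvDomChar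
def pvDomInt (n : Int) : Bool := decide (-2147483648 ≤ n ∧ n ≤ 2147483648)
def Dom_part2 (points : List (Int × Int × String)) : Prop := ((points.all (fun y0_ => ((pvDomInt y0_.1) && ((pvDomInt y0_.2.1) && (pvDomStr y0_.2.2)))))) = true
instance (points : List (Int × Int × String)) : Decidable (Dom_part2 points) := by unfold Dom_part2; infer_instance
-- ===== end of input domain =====

-- A counts flood-fill waves with two frontier lists and a minute counter (duplicate
-- frontier entries can be re-processed); B runs one flat BFS queue, records each cell's
-- distance once in a dist map at discovery time, and returns the largest distance.

-- the dict argument (assoc list → Python dict: last value wins, first position kept)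
def part2Dict (points : List (Int × Int × String)) : PySem.Dict (Int × Int) String :=
  points.foldl (fun d e => d.insert (e.1, e.2.1) e.2.2) PySem.Dict.empty

def part2Nbrs : List (Int × Int) := [(0, -1), (0, 1), (-1, 0), (1, 0)]

-- ===== PORT A =====
-- inner `while queue:` — queue.pop() pops the LAST element, so A's queue is carried
-- reversed here (head = next pop, same pops in the same order); queue_next_minute in append order
def part2Inner (d : PySem.Dict (Int × Int) String) :
    List (Int × Int) → PySem.Set (Int × Int) → List (Int × Int) →
    PySem.Set (Int × Int) × List (Int × Int)
  | [], seen, nxt => (seen, nxt)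
  | c :: qr, seen, nxt =>
      part2Inner d qr (PySem.Set.add seen c)
        (part2Nbrs.foldl (fun acc dd =>
          if !(PySem.Set.contains (PySem.Set.add seen c) (c.1 + dd.1, c.2 + dd.2))
              && (PySem.Dict.getD d (c.1 + dd.1, c.2 + dd.2) "#" == ".")
          then acc ++ [(c.1 + dd.1, c.2 + dd.2)] else acc) nxt)

-- outer `while queue:` with fuel; points.length + 2 iterations always suffice
-- (every non-final wave puts a new '.' key of the dict into `seen`)
def part2Outer (d : PySem.Dict (Int × Int) String) :
    Nat → List (Int × Int) → PySem.Set (Int × Int) → Int → Int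
  | 0, _, _, minutes => minutes
  | _ + 1, [], _, minutes => minutes
  | fuel + 1, c :: q, seen, minutes =>
      let r := part2Inner d ((c :: q).reverse) seen []
      part2Outer d fuel r.2 r.1 (minutes + 1)

def part2 (points : List (Int × Int × String)) : Int :=
  match (part2Dict points).items.find? (fun kv => kv.2 == "O") with
  | none => 0  -- Python raises StopIteration here; excluded by Pre_part2
  | some kv => part2Outer (part2Dict points) (points.length + 2) [kv.1] PySem.Set.empty (-1)

-- ===== PORT B =====
-- the `for dx, dy in …` body of Source B: try the 4 neighbours of c, appending fresh '.'
-- cells to the queue and recording their distance dc + 1 in dist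
def part2AltCell (d : PySem.Dict (Int × Int) String) (c : Int × Int) (dc : Int)
    (st : List (Int × Int) × PySem.Dict (Int × Int) Int) :
    List (Int × Int) × PySem.Dict (Int × Int) Int :=
  part2Nbrs.foldl (fun st dd =>
    if !(PySem.Dict.contains st.2 (c.1 + dd.1, c.2 + dd.2))
        && (PySem.Dict.getD d (c.1 + dd.1, c.2 + dd.2) "#" == ".")
    then (st.1 ++ [(c.1 + dd.1, c.2 + dd.2)],
          PySem.Dict.insert st.2 (c.1 + dd.1, c.2 + dd.2) (dc + 1))
    else st) st

-- `while i < len(queue):` — the not-yet-visited tail queue[i:] is the carried list;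
-- fuel: each step either stops or consumes one queue cell, and at most
-- points.length + 1 cells (distinct dist keys) are ever enqueued
def part2AltGo (d : PySem.Dict (Int × Int) String) :
    Nat → List (Int × Int) → PySem.Dict (Int × Int) Int → PySem.Dict (Int × Int) Int
  | 0, _, dist => dist
  | _ + 1, [], dist => dist
  | fuel + 1, c :: rest, dist =>
      let st := part2AltCell d c (dist.getD c 0) (rest, dist)  -- dist[(x, y)]: key always present
      part2AltGo d fuel st.1 st.2

def part2_alt (points : List (Int × Int × String)) : Int :=
  match (part2Dict points).items.find? (fun kv => kv.2 == "O") with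
  | none => 0  -- Python raises StopIteration here; excluded by Pre_part2
  | some kv =>
      match PySem.List.max? (PySem.Dict.values
          (part2AltGo (part2Dict points) (points.length + 1) [kv.1]
            (PySem.Dict.insert PySem.Dict.empty kv.1 0))) (fun v => v) with
      | some m => m
      | none => 0  -- max() on an empty dict; dist always holds the source, unreachable

-- ===== PRECONDITION & SPEC =====
-- Pre_ excludes exactly the inputs whose dict holds no 'O' value: there both Pythons
-- raise StopIteration at the next(...) call.
def Pre_part2 (points : List (Int × Int × String)) : Prop :=
  ((part2Dict points).values.any (fun v => v == "O")) = true
instance (points : List (Int × Int × String)) : Decidable (Pre_part2 points) := by unfold Pre_part2; infer_instance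

def pvWitness_part2 : List (Int × Int × String) := [(0, 0, "O"), (0, 1, "."), (1, 0, "."), (2, 0, "#")]

def Spec_part2 (points : List (Int × Int × String)) (out : Int) : Prop := out = part2_alt points
instance (points : List (Int × Int × String)) (out : Int) : Decidable (Spec_part2 points out) := by unfold Spec_part2; infer_instance

-- ===== CLAIM (what is proved, stated in full; the proofs are below) =====
def Claim_equal_part2 : Prop := ∀ (points : List (Int × Int × String)), Dom_part2 points → Pre_part2 points → Spec_part2 points (part2 points)

-- ===== LEMMAS AND PROOFS =====

-- every step offset changes x+y by exactly ±1
theorem part2Nbrs_sum (dd : Int × Int) (h : dd ∈ part2Nbrs) : dd.1 + dd.2 = 1 ∨ dd.1 + dd.2 = -1 := by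
  simp [part2Nbrs] at h
  rcases h with h | h | h | h <;> subst h <;> norm_num

-- membership through the neighbour fold of port A's inner loop
theorem part2_foldA_mem (d : PySem.Dict (Int × Int) String) (s : PySem.Set (Int × Int)) (c : Int × Int) :
    ∀ (l : List (Int × Int)) (nxt : List (Int × Int)) (v : Int × Int),
    (v ∈ l.foldl (fun acc dd =>
      if !(PySem.Set.contains s (c.1 + dd.1, c.2 + dd.2))
          && (PySem.Dict.getD d (c.1 + dd.1, c.2 + dd.2) "#" == ".")
      then acc ++ [(c.1 + dd.1, c.2 + dd.2)] else acc) nxt) ↔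
    v ∈ nxt ∨ ∃ dd ∈ l, v = (c.1 + dd.1, c.2 + dd.2) ∧
      v ∉ s ∧ PySem.Dict.getD d v "#" = "." := by
  intro l
  induction l with
  | nil => intro nxt v; simp
  | cons d0 l ih =>
      intro nxt v
      rw [List.foldl_cons, ih]
      by_cases hs : PySem.Set.contains s (c.1 + d0.1, c.2 + d0.2) = true
      · have hcond : (!(PySem.Set.contains s (c.1 + d0.1, c.2 + d0.2))
            && (PySem.Dict.getD d (c.1 + d0.1, c.2 + d0.2) "#" == ".")) = false := by
          rw [hs]; rfl
        rw [hcond]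
        simp only [Bool.false_eq_true, if_false]
        have hP : ¬ (v = ((c.1 + d0.1, c.2 + d0.2) : Int × Int) ∧
            v ∉ s ∧ PySem.Dict.getD d v "#" = ".") := by
          rintro ⟨rfl, hns, _⟩; exact hns ((PySem.Set.contains_iff _ _).mp hs)
        constructor
        · rintro (h | ⟨dd, hdd, hPd⟩)
          · exact Or.inl h
          · exact Or.inr ⟨dd, List.mem_cons_of_mem _ hdd, hPd⟩
        · rintro (h | ⟨dd, hdd, hPd⟩)
          · exact Or.inl h
          · rcases List.mem_cons.mp hdd with rfl | hdl
            · exact absurd hPd hP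
            · exact Or.inr ⟨dd, hdl, hPd⟩
      · have hs' : PySem.Set.contains s (c.1 + d0.1, c.2 + d0.2) = false := Bool.eq_false_iff.mpr hs
        by_cases hdot : PySem.Dict.getD d (c.1 + d0.1, c.2 + d0.2) "#" = "."
        · have hcond : (!(PySem.Set.contains s (c.1 + d0.1, c.2 + d0.2))
              && (PySem.Dict.getD d (c.1 + d0.1, c.2 + d0.2) "#" == ".")) = true := by
            rw [hs']; simp [hdot]
          rw [hcond]
          simp only [if_true, List.mem_append, List.mem_singleton]
          have hP : (v = ((c.1 + d0.1, c.2 + d0.2) : Int × Int) ∧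
              v ∉ s ∧ PySem.Dict.getD d v "#" = ".") ↔
              v = ((c.1 + d0.1, c.2 + d0.2) : Int × Int) := by
            constructor
            · rintro ⟨rfl, _, _⟩; rfl
            · rintro rfl
              exact ⟨rfl, fun hm => hs ((PySem.Set.contains_iff _ _).mpr hm), hdot⟩
          constructor
          · rintro ((h | h) | ⟨dd, hdd, hPd⟩)
            · exact Or.inl h
            · exact Or.inr ⟨d0, List.mem_cons_self, hP.mpr h⟩
            · exact Or.inr ⟨dd, List.mem_cons_of_mem _ hdd, hPd⟩
          · rintro (h | ⟨dd, hdd, hPd⟩)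
            · exact Or.inl (Or.inl h)
            · rcases List.mem_cons.mp hdd with rfl | hdl
              · exact Or.inl (Or.inr (hP.mp hPd))
              · exact Or.inr ⟨dd, hdl, hPd⟩
        · have hcond : (!(PySem.Set.contains s (c.1 + d0.1, c.2 + d0.2))
              && (PySem.Dict.getD d (c.1 + d0.1, c.2 + d0.2) "#" == ".")) = false := by
            rw [hs', beq_eq_false_iff_ne.mpr hdot]; rfl
          rw [hcond]
          simp only [Bool.false_eq_true, if_false]
          have hP : ¬ (v = ((c.1 + d0.1, c.2 + d0.2) : Int × Int) ∧
              v ∉ s ∧ PySem.Dict.getD d v "#" = ".") := by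
            rintro ⟨rfl, _, h⟩; exact hdot h
          constructor
          · rintro (h | ⟨dd, hdd, hPd⟩)
            · exact Or.inl h
            · exact Or.inr ⟨dd, List.mem_cons_of_mem _ hdd, hPd⟩
          · rintro (h | ⟨dd, hdd, hPd⟩)
            · exact Or.inl h
            · rcases List.mem_cons.mp hdd with rfl | hdl
              · exact absurd hPd hP
              · exact Or.inr ⟨dd, hdl, hPd⟩

-- characterisation of port A's inner while-loop: final `seen` and final queue_next_minute
theorem part2Inner_spec (d : PySem.Dict (Int × Int) String) (p : Int) :
    ∀ (q : List (Int × Int)) (seen : PySem.Set (Int × Int)) (nxt : List (Int × Int)),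
    (∀ c ∈ q, (c.1 + c.2) % 2 = p) →
    (∀ v, v ∈ (part2Inner d q seen nxt).1 ↔ v ∈ seen ∨ v ∈ q) ∧
    (∀ v, v ∈ (part2Inner d q seen nxt).2 ↔ v ∈ nxt ∨
      ∃ c ∈ q, ∃ dd ∈ part2Nbrs, v = (c.1 + dd.1, c.2 + dd.2) ∧
        v ∉ seen ∧ PySem.Dict.getD d v "#" = ".") := by
  intro q
  induction q with
  | nil =>
      intro seen nxt _
      constructor <;> intro v <;> simp [part2Inner]
  | cons c q ih =>
      intro seen nxt hq
      have hc : (c.1 + c.2) % 2 = p := hq c List.mem_cons_self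
      have hq' : ∀ c' ∈ q, (c'.1 + c'.2) % 2 = p := fun c' h => hq c' (List.mem_cons_of_mem _ h)
      have hnotc : ∀ (c' dd : Int × Int), c' ∈ c :: q → dd ∈ part2Nbrs →
          ((c'.1 + dd.1, c'.2 + dd.2) : Int × Int) ≠ c := by
        intro c' dd hc' hdd hEq
        have h1 : (c'.1 + c'.2) % 2 = p := hq c' hc'
        have h2 := part2Nbrs_sum dd hdd
        have h3a : c'.1 + dd.1 = c.1 := congrArg Prod.fst hEq
        have h3b : c'.2 + dd.2 = c.2 := congrArg Prod.snd hEq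
        omega
      constructor
      · intro v
        simp only [part2Inner]
        rw [(ih _ _ hq').1 v, PySem.Set.mem_add, List.mem_cons]
        tauto
      · intro v
        simp only [part2Inner]
        rw [(ih _ _ hq').2 v, part2_foldA_mem]
        constructor
        · rintro ((h | ⟨dd, hdd, rfl, hns, hdot⟩) | ⟨c', hc', dd, hdd, rfl, hns, hdot⟩)
          · exact Or.inl h
          · exact Or.inr ⟨c, List.mem_cons_self, dd, hdd, rfl,
              fun hm => hns ((PySem.Set.mem_add _ _ _).mpr (Or.inl hm)), hdot⟩
          · exact Or.inr ⟨c', List.mem_cons_of_mem _ hc', dd, hdd, rfl,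
              fun hm => hns ((PySem.Set.mem_add _ _ _).mpr (Or.inl hm)), hdot⟩
        · rintro (h | ⟨c', hc', dd, hdd, rfl, hns, hdot⟩)
          · exact Or.inl (Or.inl h)
          · have hadd : ((c'.1 + dd.1, c'.2 + dd.2) : Int × Int) ∉ PySem.Set.add seen c := by
              rw [PySem.Set.mem_add]
              rintro (h | h)
              · exact hns h
              · exact hnotc c' dd hc' hdd h
            rcases List.mem_cons.mp hc' with rfl | hcq
            · exact Or.inl (Or.inr ⟨dd, hdd, rfl, hadd, hdot⟩)
            · exact Or.inr ⟨c', hcq, dd, hdd, rfl, hadd, hdot⟩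

-- the neighbour fold of B: it appends a block of fresh cells to the queue and the same
-- block (with value dc+1) to dist's items
theorem part2_cellfold (d : PySem.Dict (Int × Int) String) (c : Int × Int) (dc : Int) :
    ∀ (l : List (Int × Int)) (q : List (Int × Int)) (dist : PySem.Dict (Int × Int) Int),
    dist.keys.Nodup →
    ∃ new : List (Int × Int),
      (l.foldl (fun st dd =>
        if !(PySem.Dict.contains st.2 (c.1 + dd.1, c.2 + dd.2))
            && (PySem.Dict.getD d (c.1 + dd.1, c.2 + dd.2) "#" == ".")
        then (st.1 ++ [(c.1 + dd.1, c.2 + dd.2)],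
              PySem.Dict.insert st.2 (c.1 + dd.1, c.2 + dd.2) (dc + 1))
        else st) (q, dist)) =
        (q ++ new, (l.foldl (fun st dd =>
        if !(PySem.Dict.contains st.2 (c.1 + dd.1, c.2 + dd.2))
            && (PySem.Dict.getD d (c.1 + dd.1, c.2 + dd.2) "#" == ".")
        then (st.1 ++ [(c.1 + dd.1, c.2 + dd.2)],
              PySem.Dict.insert st.2 (c.1 + dd.1, c.2 + dd.2) (dc + 1))
        else st) (q, dist)).2) ∧
      ((l.foldl (fun st dd =>
        if !(PySem.Dict.contains st.2 (c.1 + dd.1, c.2 + dd.2))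
            && (PySem.Dict.getD d (c.1 + dd.1, c.2 + dd.2) "#" == ".")
        then (st.1 ++ [(c.1 + dd.1, c.2 + dd.2)],
              PySem.Dict.insert st.2 (c.1 + dd.1, c.2 + dd.2) (dc + 1))
        else st) (q, dist)).2).items = dist.items ++ new.map (fun v => (v, dc + 1)) ∧
      ((l.foldl (fun st dd =>
        if !(PySem.Dict.contains st.2 (c.1 + dd.1, c.2 + dd.2))
            && (PySem.Dict.getD d (c.1 + dd.1, c.2 + dd.2) "#" == ".")
        then (st.1 ++ [(c.1 + dd.1, c.2 + dd.2)],
              PySem.Dict.insert st.2 (c.1 + dd.1, c.2 + dd.2) (dc + 1))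
        else st) (q, dist)).2).keys.Nodup ∧
      (∀ v : Int × Int, v ∈ new ↔ v ∉ dist.keys ∧ ∃ dd ∈ l,
        v = (c.1 + dd.1, c.2 + dd.2) ∧ PySem.Dict.getD d v "#" = ".") := by
  intro l
  induction l with
  | nil =>
      intro q dist hnd
      exact ⟨[], by simp, by simp, hnd, by simp⟩
  | cons dd0 l ih =>
      intro q dist hnd
      by_cases hcont : PySem.Dict.contains dist (c.1 + dd0.1, c.2 + dd0.2) = true
      · have hcond : (!(PySem.Dict.contains dist (c.1 + dd0.1, c.2 + dd0.2))
            && (PySem.Dict.getD d (c.1 + dd0.1, c.2 + dd0.2) "#" == ".")) = false := by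
          rw [hcont]; rfl
        rw [List.foldl_cons]
        simp only [hcond, Bool.false_eq_true, if_false]
        obtain ⟨new, h1, h2, h3, h4⟩ := ih q dist hnd
        refine ⟨new, h1, h2, h3, fun v => ?_⟩
        rw [h4 v]
        constructor
        · rintro ⟨hk, dd, hdd, hv⟩; exact ⟨hk, dd, List.mem_cons_of_mem _ hdd, hv⟩
        · rintro ⟨hk, dd, hdd, hveq, hvdot⟩
          rcases List.mem_cons.mp hdd with rfl | hdl
          · exact absurd ((PySem.Dict.contains_iff_mem_keys _ _).mp hcont) (hveq ▸ hk)
          · exact ⟨hk, dd, hdl, hveq, hvdot⟩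
      · have hcont' : PySem.Dict.contains dist (c.1 + dd0.1, c.2 + dd0.2) = false :=
          Bool.eq_false_iff.mpr hcont
        have hnk : ((c.1 + dd0.1, c.2 + dd0.2) : Int × Int) ∉ dist.keys := by
          intro hm; exact hcont ((PySem.Dict.contains_iff_mem_keys _ _).mpr hm)
        by_cases hdot : PySem.Dict.getD d (c.1 + dd0.1, c.2 + dd0.2) "#" = "."
        · have hcond : (!(PySem.Dict.contains dist (c.1 + dd0.1, c.2 + dd0.2))
              && (PySem.Dict.getD d (c.1 + dd0.1, c.2 + dd0.2) "#" == ".")) = true := by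
            rw [hcont']; simp [hdot]
          rw [List.foldl_cons]
          simp only [hcond, if_true]
          have hkeys' : (dist.insert (c.1 + dd0.1, c.2 + dd0.2) (dc + 1)).keys
              = dist.keys ++ [(c.1 + dd0.1, c.2 + dd0.2)] :=
            PySem.Dict.keys_insert_of_not_contains _ _ hcont'
          have hnd' : (dist.insert (c.1 + dd0.1, c.2 + dd0.2) (dc + 1)).keys.Nodup := by
            rw [hkeys']
            exact List.Nodup.append hnd (List.nodup_singleton _)
              (by intro a ha hb; simp at hb; subst hb; exact hnk ha)
          obtain ⟨new, h1, h2, h3, h4⟩ := ih (q ++ [(c.1 + dd0.1, c.2 + dd0.2)])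
            (dist.insert (c.1 + dd0.1, c.2 + dd0.2) (dc + 1)) hnd'
          have hitems' : (dist.insert (c.1 + dd0.1, c.2 + dd0.2) (dc + 1)).items
              = dist.items ++ [((c.1 + dd0.1, c.2 + dd0.2), dc + 1)] :=
            PySem.Dict.items_insert_of_not_contains _ _ hcont'
          refine ⟨(c.1 + dd0.1, c.2 + dd0.2) :: new, ?_, ?_, h3, ?_⟩
        -- three goals
          · rw [h1]; simp
          · rw [h2, hitems']; simp
          · intro v
            rw [List.mem_cons, h4 v, hkeys']
            constructor
            · rintro (rfl | ⟨hk, dd, hdd, hv⟩)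
              · exact ⟨hnk, dd0, List.mem_cons_self, rfl, hdot⟩
              · refine ⟨fun hm => hk (List.mem_append_left _ hm), dd, List.mem_cons_of_mem _ hdd, hv⟩
            · rintro ⟨hk, dd, hdd, hveq, hvdot⟩
              by_cases hv0 : v = ((c.1 + dd0.1, c.2 + dd0.2) : Int × Int)
              · exact Or.inl hv0
              · rcases List.mem_cons.mp hdd with rfl | hdl
                · exact absurd hveq hv0
                · refine Or.inr ⟨?_, dd, hdl, hveq, hvdot⟩
                  rw [List.mem_append]
                  rintro (h | h)
                  · exact hk h
                  · simp at h; exact hv0 h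
        · have hcond : (!(PySem.Dict.contains dist (c.1 + dd0.1, c.2 + dd0.2))
              && (PySem.Dict.getD d (c.1 + dd0.1, c.2 + dd0.2) "#" == ".")) = false := by
            rw [hcont', beq_eq_false_iff_ne.mpr hdot]; rfl
          rw [List.foldl_cons]
          simp only [hcond, Bool.false_eq_true, if_false]
          obtain ⟨new, h1, h2, h3, h4⟩ := ih q dist hnd
          refine ⟨new, h1, h2, h3, fun v => ?_⟩
          rw [h4 v]
          constructor
          · rintro ⟨hk, dd, hdd, hv⟩; exact ⟨hk, dd, List.mem_cons_of_mem _ hdd, hv⟩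
          · rintro ⟨hk, dd, hdd, hveq, hvdot⟩
            rcases List.mem_cons.mp hdd with rfl | hdl
            · exact absurd (hveq ▸ hvdot) hdot
            · exact ⟨hk, dd, hdl, hveq, hvdot⟩

-- keys of a dict whose items are items0 ++ a fresh block
theorem part2_keys_of_items (dist dist0 : PySem.Dict (Int × Int) Int) (blk : List (Int × Int)) (m : Int)
    (h : dist.items = dist0.items ++ blk.map (fun v => (v, m))) :
    dist.keys = dist0.keys ++ blk := by
  simp only [PySem.Dict.keys, h, List.map_append, List.map_map]
  simp [Function.comp_def]

-- one whole BFS level of B: consuming `cur` costs |cur| fuel, appends the block of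
-- newly discovered cells to the queue and to dist (all with value m + 1)
theorem part2_level (d : PySem.Dict (Int × Int) String) (m : Int) :
    ∀ (cur : List (Int × Int)) (fuel : Nat) (disc : List (Int × Int))
      (dist0 dist : PySem.Dict (Int × Int) Int),
    cur.length ≤ fuel →
    dist.keys.Nodup →
    dist.items = dist0.items ++ disc.map (fun v => (v, m + 1)) →
    (∀ c ∈ cur, dist0.get? c = some m) →
    ∃ discT distT,
      part2AltGo d fuel (cur ++ disc) dist = part2AltGo d (fuel - cur.length) discT distT ∧
      distT.items = dist0.items ++ discT.map (fun v => (v, m + 1)) ∧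
      distT.keys.Nodup ∧
      (∀ v, v ∈ discT ↔ v ∈ disc ∨ (v ∉ dist0.keys ∧ ∃ c ∈ cur, ∃ dd ∈ part2Nbrs,
        v = (c.1 + dd.1, c.2 + dd.2) ∧ PySem.Dict.getD d v "#" = ".")) := by
  intro cur
  induction cur with
  | nil =>
      intro fuel disc dist0 dist _ hnd hitems _
      refine ⟨disc, dist, rfl, hitems, hnd, fun v => ?_⟩
      · simp
  | cons c cur' ih =>
      intro fuel disc dist0 dist hfuel hnd hitems hval
      cases fuel with
      | zero => simp at hfuel
      | succ f =>
          have hgetc : dist.getD c 0 = m := by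
            have h0 : (c, m) ∈ dist0.items :=
              PySem.Dict.mem_items_of_get?_eq_some dist0 (hval c List.mem_cons_self)
            have h1 : (c, m) ∈ dist.items := by
              rw [hitems]; exact List.mem_append_left _ h0
            exact PySem.Dict.getD_of_mem_items dist h1 hnd 0
          have hkeys : dist.keys = dist0.keys ++ disc :=
            part2_keys_of_items dist dist0 disc (m + 1) hitems
          obtain ⟨new, hc1, hc2, hc3, hc4⟩ :=
            part2_cellfold d c m part2Nbrs (cur' ++ disc) dist hnd
          have hstep : part2AltGo d (f + 1) ((c :: cur') ++ disc) dist =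
              part2AltGo d f ((cur' ++ disc) ++ new)
                (part2AltCell d c (dist.getD c 0) (cur' ++ disc, dist)).2 := by
            show part2AltGo d f (part2AltCell d c (dist.getD c 0) (cur' ++ disc, dist)).1
                (part2AltCell d c (dist.getD c 0) (cur' ++ disc, dist)).2 = _
            rw [hgetc]
            unfold part2AltCell
            rw [hc1]
          rw [hgetc] at hstep
          have hitems2 : (part2AltCell d c m (cur' ++ disc, dist)).2.items =
              dist0.items ++ ((disc ++ new).map (fun v => (v, m + 1))) := by
            unfold part2AltCell
            rw [hc2, hitems, List.map_append, List.append_assoc]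
          obtain ⟨discT, distT, hg, hi, hn, hm⟩ := ih f (disc ++ new) dist0
            (part2AltCell d c m (cur' ++ disc, dist)).2
            (by simpa using Nat.le_of_succ_le_succ hfuel)
            (by unfold part2AltCell; exact hc3)
            hitems2
            (fun c' h => hval c' (List.mem_cons_of_mem _ h))
          refine ⟨discT, distT, ?_, hi, hn, fun v => ?_⟩
          · rw [hstep]
            rw [← List.append_assoc] at hg
            rw [hg, List.length_cons, Nat.succ_sub_succ]
          · rw [hm v]
            constructor
            · rintro (hvd | ⟨hk0, c', hc', hrest⟩)
              · rcases List.mem_append.mp hvd with h | h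
                · exact Or.inl h
                · -- v ∈ new
                  obtain ⟨hkd, dd, hdd, hveq, hvdot⟩ := (hc4 v).mp h
                  refine Or.inr ⟨fun hm0 => hkd (hkeys ▸ List.mem_append_left _ hm0),
                    c, List.mem_cons_self, dd, hdd, hveq, hvdot⟩
              · exact Or.inr ⟨hk0, c', List.mem_cons_of_mem _ hc', hrest⟩
            · rintro (hvd | ⟨hk0, c', hc', dd, hdd, hveq, hvdot⟩)
              · exact Or.inl (List.mem_append_left _ hvd)
              · by_cases hvdisc : v ∈ disc
                · exact Or.inl (List.mem_append_left _ hvdisc)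
                · rcases List.mem_cons.mp hc' with rfl | hcl
                  · -- generated by the popped cell c: v lands in `new`
                    refine Or.inl (List.mem_append_right _ ((hc4 v).mpr ⟨?_, dd, hdd, hveq, hvdot⟩))
                    rw [hkeys, List.mem_append]
                    rintro (h | h)
                    · exact hk0 h
                    · exact hvdisc h
                  · exact Or.inr ⟨hk0, c', hcl, dd, hdd, hveq, hvdot⟩

-- extracting Python's max(dist.values())
theorem part2_max_of_bounds (vals : List Int) (M : Int) (hmem : M ∈ vals)
    (hb : ∀ w ∈ vals, w ≤ M) :
    (match PySem.List.max? vals (fun v => v) with | some m => m | none => 0) = M := by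
  cases h : PySem.List.max? vals (fun v => v) with
  | none =>
      rw [(PySem.List.max?_eq_none_iff _ _).mp h] at hmem
      exact absurd hmem (List.not_mem_nil)
  | some m' =>
      have h1 : m' ∈ vals := PySem.List.max?_mem h
      have h2 : M ≤ m' := PySem.List.max?_isMax h M hmem
      exact le_antisymm (hb m' h1) h2

theorem part2_values_of_items (dist dist0 : PySem.Dict (Int × Int) Int) (blk : List (Int × Int)) (m : Int)
    (h : dist.items = dist0.items ++ blk.map (fun v => (v, m))) :
    dist.values = dist0.values ++ blk.map (fun _ => m) := by
  simp only [PySem.Dict.values, h, List.map_append, List.map_map]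
  simp [Function.comp_def]

-- the lock-step bisimulation: A's wave loop (state: queue, seen, minutes) against B's
-- flat BFS (state: pending queue tail, dist) observed at level boundaries
theorem part2_bisim (d : PySem.Dict (Int × Int) String) :
    ∀ (fuelA : Nat) (q : List (Int × Int)) (seen : PySem.Set (Int × Int))
      (cur : List (Int × Int)) (dist : PySem.Dict (Int × Int) Int)
      (minutes : Int) (fuelB : Nat) (p : Int),
    (∀ v, v ∈ q ↔ v ∈ cur) →
    (∀ v : Int × Int, v ∈ dist.keys ↔ v ∈ seen ∨ v ∈ cur) →
    dist.keys.Nodup →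
    (∀ c ∈ q, (c.1 + c.2) % 2 = p) →
    (∀ c ∈ cur, dist.get? c = some (minutes + 1)) →
    (∀ w ∈ dist.values, w ≤ (if cur = [] then minutes else minutes + 1)) →
    ((if cur = [] then minutes else minutes + 1) ∈ dist.values) →
    (∀ k ∈ dist.keys, k ∈ d.keys) →
    fuelB + dist.keys.length ≥ d.keys.length + 1 + cur.length →
    ((fuelA : Int) + minutes ≥ (d.keys.length : Int) + 1) →
    (minutes + 1 + (cur.length : Int) ≤ (dist.keys.length : Int)) →
    part2Outer d fuelA q seen minutes =
      (match PySem.List.max? (PySem.Dict.values (part2AltGo d fuelB cur dist)) (fun v => v) with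
       | some mx => mx | none => 0) := by
  intro fuelA
  induction fuelA with
  | zero =>
      intro q seen cur dist minutes fuelB p h1 h3 hnd h4 h5 h6 h7 hsub h8 h10a h10b
      have hkle : dist.keys.length ≤ d.keys.length :=
        (List.subperm_of_subset hnd (fun k hk => hsub k hk)).length_le
      cases q with
      | cons c q' =>
          exfalso
          have hcpos : 0 < cur.length := List.length_pos_of_mem ((h1 c).mp List.mem_cons_self)
          omega
      | nil =>
          have hcur : cur = [] := by
            cases hcc : cur with
            | nil => rfl
            | cons a l =>
                exact absurd ((h1 a).mpr (hcc ▸ List.mem_cons_self)) (List.not_mem_nil)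
          subst hcur
          have hBfix : part2AltGo d fuelB [] dist = dist := by
            cases fuelB <;> rfl
          show (minutes : Int) = _
          rw [hBfix]
          exact (part2_max_of_bounds _ minutes (by simpa using h7) (by simpa using h6)).symm
  | succ fA ih =>
      intro q seen cur dist minutes fuelB p h1 h3 hnd h4 h5 h6 h7 hsub h8 h10a h10b
      have hkle : dist.keys.length ≤ d.keys.length :=
        (List.subperm_of_subset hnd (fun k hk => hsub k hk)).length_le
      cases q with
      | nil =>
          have hcur : cur = [] := by
            cases hcc : cur with
            | nil => rfl
            | cons a l =>
                exact absurd ((h1 a).mpr (hcc ▸ List.mem_cons_self)) (List.not_mem_nil)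
          subst hcur
          have hBfix : part2AltGo d fuelB [] dist = dist := by
            cases fuelB <;> rfl
          show (minutes : Int) = _
          rw [hBfix]
          exact (part2_max_of_bounds _ minutes (by simpa using h7) (by simpa using h6)).symm
      | cons c q' =>
          have hcmem : c ∈ cur := (h1 c).mp List.mem_cons_self
          have hcne : cur ≠ [] := fun he => by rw [he] at hcmem; exact List.not_mem_nil hcmem
          have hcpos : 0 < cur.length := List.length_pos_of_mem hcmem
          have hcurpar : ∀ c' ∈ cur, (c'.1 + c'.2) % 2 = p :=
            fun c' h => h4 c' ((h1 c').mpr h)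
          have hparrev : ∀ c' ∈ (c :: q').reverse, (c'.1 + c'.2) % 2 = p :=
            fun c' h => h4 c' (List.mem_reverse.mp h)
          obtain ⟨hA1, hA2⟩ := part2Inner_spec d p ((c :: q').reverse) seen [] hparrev
          have hfuelcur : cur.length ≤ fuelB := by omega
          obtain ⟨discT, distT, hg, hi, hn, hm⟩ :=
            part2_level d (minutes + 1) cur fuelB [] dist dist hfuelcur hnd (by simp) h5
          rw [List.append_nil] at hg
          have hkeysT : distT.keys = dist.keys ++ discT :=
            part2_keys_of_items distT dist discT (minutes + 1 + 1) hi
          have hvalsT : distT.values = dist.values ++ discT.map (fun _ => minutes + 1 + 1) :=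
            part2_values_of_items distT dist discT (minutes + 1 + 1) hi
          have hmm : ∀ v : Int × Int, v ∈ discT ↔ v ∉ dist.keys ∧ ∃ c' ∈ cur, ∃ dd ∈ part2Nbrs,
              v = (c'.1 + dd.1, c'.2 + dd.2) ∧ PySem.Dict.getD d v "#" = "." := by
            intro v; rw [hm v]; simp
          have hdotmem : ∀ v : Int × Int, PySem.Dict.getD d v "#" = "." → v ∈ d.keys := by
            intro v hdot
            by_cases hc : PySem.Dict.contains d v = true
            · exact (PySem.Dict.contains_iff_mem_keys _ _).mp hc
            · rw [PySem.Dict.getD_of_not_contains _ _ (Bool.eq_false_iff.mpr hc)] at hdot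
              exact absurd hdot (by decide)
          have hparT : ∀ v ∈ discT, (v.1 + v.2) % 2 = (p + 1) % 2 := by
            intro v hv
            obtain ⟨_, c', hc', dd, hdd, rfl, _⟩ := (hmm v).mp hv
            have := hcurpar c' hc'
            have := part2Nbrs_sum dd hdd
            simp only []
            omega
          -- the A-side step
          show part2Outer d fA (part2Inner d ((c :: q').reverse) seen []).2
              (part2Inner d ((c :: q').reverse) seen []).1 (minutes + 1) = _
          rw [hg]
          apply ih _ _ _ _ _ _ ((p + 1) % 2)
          · -- queue of the next wave has the members of discT
            intro v
            rw [hA2 v, hmm v]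
            simp only [List.not_mem_nil, false_or]
            constructor
            · rintro ⟨c', hc', dd, hdd, rfl, hns, hdot⟩
              have hc'c : c' ∈ cur := (h1 c').mp (List.mem_reverse.mp hc')
              refine ⟨?_, c', hc'c, dd, hdd, rfl, hdot⟩
              rw [h3]
              rintro (h | h)
              · exact hns h
              · have hp1 := hcurpar c' hc'c
                have hp2 := hcurpar _ h
                have := part2Nbrs_sum dd hdd
                simp only [] at hp2
                omega
            · rintro ⟨hk, c', hc', dd, hdd, rfl, hdot⟩
              refine ⟨c', List.mem_reverse.mpr ((h1 c').mpr hc'), dd, hdd, rfl, ?_, hdot⟩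
              intro hs
              exact hk ((h3 _).mpr (Or.inl hs))
          · -- keys of distT = new seen ∪ new frontier
            intro v
            rw [hkeysT, List.mem_append, hA1 v, List.mem_reverse, h3 v]
            have hvc : v ∈ cur ↔ v ∈ c :: q' := (h1 v).symm
            tauto
          · exact hn
          · -- parity of the next wave
            intro c'' hc''
            rw [hA2 c''] at hc''
            rcases hc'' with h | ⟨c', hc', dd, hdd, rfl, _, _⟩
            · exact absurd h (List.not_mem_nil)
            · have := hparrev c' hc'
              have := part2Nbrs_sum dd hdd
              simp only []
              omega
          · -- distances of the next frontier
            intro c'' hc''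
            have : (c'', minutes + 1 + 1) ∈ distT.items := by
              rw [hi]
              exact List.mem_append_right _ (List.mem_map.mpr ⟨c'', hc'', rfl⟩)
            exact PySem.Dict.get?_of_mem_items distT this hn
          · -- upper bound on all recorded distances
            intro w hw
            rw [hvalsT] at hw
            rcases List.mem_append.mp hw with h | h
            · have := h6 w h
              rw [if_neg hcne] at this
              split_ifs <;> omega
            · obtain ⟨_, _, rfl⟩ := List.mem_map.mp h
              have hne2 : discT ≠ [] := by rintro rfl; simp at h
              rw [if_neg hne2]
          · -- the maximal distance is attained
            rw [hvalsT]
            cases hdT : discT with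
            | nil =>
                simp only [List.map_nil, List.append_nil]
                have := h7
                rw [if_neg hcne] at this
                exact this
            | cons x xs =>
                rw [if_neg (by simp)]
                exact List.mem_append_right _ (List.mem_map.mpr ⟨x, List.mem_cons_self, rfl⟩)
          · -- every dist key is a maze key
            intro k hk
            rw [hkeysT, List.mem_append] at hk
            rcases hk with h | h
            · exact hsub k h
            · obtain ⟨_, _, _, _, _, _, hdot⟩ := (hmm k).mp h
              exact hdotmem k hdot
          · -- fuel accounting for B
            rw [hkeysT, List.length_append]
            omega
          · -- fuel accounting for A
            push_cast at h10a ⊢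
            omega
          · -- level count bound
            rw [hkeysT, List.length_append]
            push_cast
            omega


-- the maze dict has at most as many entries as the input list
theorem part2Dict_size : ∀ (l : List (Int × Int × String)) (d0 : PySem.Dict (Int × Int) String),
    (l.foldl (fun d e => d.insert (e.1, e.2.1) e.2.2) d0).items.length ≤ d0.items.length + l.length := by
  intro l
  induction l with
  | nil => intro d0; simp
  | cons e l ih =>
      intro d0
      rw [List.foldl_cons]
      refine le_trans (ih _) ?_
      have : (d0.insert (e.1, e.2.1) e.2.2).items.length ≤ d0.items.length + 1 := by
        by_cases hc : PySem.Dict.contains d0 (e.1, e.2.1) = true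
        · rw [PySem.Dict.items_insert_of_contains _ _ hc]
          simp
        · rw [PySem.Dict.items_insert_of_not_contains _ _ (Bool.eq_false_iff.mpr hc)]
          simp
      simp only [List.length_cons]
      omega

theorem part2_eq_alt (points : List (Int × Int × String)) :
    part2 points = part2_alt points := by
  unfold part2 part2_alt
  cases hf : (part2Dict points).items.find? (fun kv => kv.2 == "O") with
  | none => rfl
  | some kv =>
      have homem : kv.1 ∈ (part2Dict points).keys :=
        PySem.Dict.mem_keys_of_mem_items _ (List.mem_of_find?_eq_some hf)
      have hk0 : (PySem.Dict.insert (PySem.Dict.empty (κ := Int × Int) (ν := Int)) kv.1 0).keys = [kv.1] := by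
        rw [PySem.Dict.keys_insert_of_not_contains _ _ (PySem.Dict.contains_empty _)]
        rfl
      have hi0 : (PySem.Dict.insert (PySem.Dict.empty (κ := Int × Int) (ν := Int)) kv.1 0).items = [(kv.1, 0)] := by
        rw [PySem.Dict.items_insert_of_not_contains _ _ (PySem.Dict.contains_empty _)]
        rfl
      have hv0 : (PySem.Dict.insert (PySem.Dict.empty (κ := Int × Int) (ν := Int)) kv.1 0).values = [(0 : Int)] := by
        simp only [PySem.Dict.values, hi0]
        rfl
      have hsize : (part2Dict points).keys.length ≤ points.length := by
        have h := part2Dict_size points PySem.Dict.empty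
        simp only [PySem.Dict.keys, List.length_map]
        simpa [part2Dict, PySem.Dict.empty] using h
      apply part2_bisim (part2Dict points) (points.length + 2) [kv.1] PySem.Set.empty [kv.1]
        _ (-1) (points.length + 1) ((kv.1.1 + kv.1.2) % 2)
      · intro v; exact Iff.rfl
      · intro v
        rw [hk0]
        simp [PySem.Set.empty]
      · rw [hk0]; exact List.nodup_singleton _
      · intro c hc
        rcases List.mem_cons.mp hc with rfl | h
        · rfl
        · exact absurd h (List.not_mem_nil)
      · intro c hc
        rcases List.mem_cons.mp hc with rfl | h
        · rw [show (-1 : Int) + 1 = 0 by norm_num]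
          exact PySem.Dict.get?_insert_self _ _ _
        · exact absurd h (List.not_mem_nil)
      · intro w hw
        rw [hv0] at hw
        rcases List.mem_cons.mp hw with rfl | h
        · norm_num
        · exact absurd h (List.not_mem_nil)
      · rw [hv0]
        norm_num
      · intro k hk
        rw [hk0] at hk
        rcases List.mem_cons.mp hk with rfl | h
        · exact homem
        · exact absurd h (List.not_mem_nil)
      · rw [hk0]
        simpa using hsize
      · push_cast
        omega
      · rw [hk0]
        norm_num

-- ===== VERDICT (by name: the statement is the Claim_ definition above) =====
theorem part2_spec : Claim_equal_part2 := by
  intro points _ _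
  unfold Spec_part2
  exact part2_eq_alt points
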